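-- pv_equiv track=rewrite | github.com/Animatic-AI-Solutions/kingstons_portal | frontend/migration_tools/migrate_frontend_api_paths.py | _convert_path
-- ===== SOURCE A (Python) =====
-- def _convert_path(path: str) -> str:
--     """
--     Convert underscore path to hyphenated format.
--     Preserves template literals ${...} and query parameters.
--     """
--     # Don't convert if already hyphenated or if it contains template literal
--     if '_' not in path:
--         return path
--
--     result = []
--     i = 0
--     while i < len(path):
--         # Preserve template literals ${...}
--         if i < len(path) - 1 and path[i:i+2] == '${':
--             end = path.find('}', i)
--             if end != -1:
--                 result.append(path[i:end+1])
--                 i = end + 1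
--                 continue
--
--         # Preserve query parameters (after ?)
--         if path[i] == '?':
--             result.append(path[i:])
--             break
--
--         # Convert underscores to hyphens
--         if path[i] == '_':
--             result.append('-')
--         else:
--             result.append(path[i])
--
--         i += 1
--
--     return ''.join(result)
-- ===== SOURCE B (Python) =====
-- def _next_special(s):
--     d = s.find('$')
--     q = s.find('?')
--     if d == -1:
--         return q
--     if q == -1:
--         return d
--     return min(d, q)
--
--
-- def _convert_path(path: str) -> str:
--     """
--     Convert underscore path to hyphenated format, preserving template
--     literals ${...} and query parameters.  Works on whole segments:
--     repeatedly jump to the next special character ('$' or '?') and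
--     bulk-convert the plain run before it with str.replace.
--     """
--     if '_' not in path:
--         return path
--     out = []
--     rest = path
--     while rest:
--         p = _next_special(rest)
--         if p == -1:
--             out.append(rest.replace('_', '-'))
--             break
--         out.append(rest[:p].replace('_', '-'))
--         rest2 = rest[p:]
--         if rest2[0] == '?':
--             out.append(rest2)
--             break
--         if rest2.startswith('${'):
--             e = rest2.find('}')
--             if e != -1:
--                 out.append(rest2[:e + 1])
--                 rest = rest2[e + 1:]
--                 continue
--         out.append('$')
--         rest = rest2[1:]
--     return ''.join(out)
-- ===== Notes on version B (the rewrite author's own statement) =====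
-- stated objective: alternative
-- what changed: Replaces A's character-by-character index loop (append one char or one template per iteration) by a segment loop that jumps straight to the next special character ('$' or '?') with str.find and bulk-converts each plain run with a single str.replace.
import Mathlib
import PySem

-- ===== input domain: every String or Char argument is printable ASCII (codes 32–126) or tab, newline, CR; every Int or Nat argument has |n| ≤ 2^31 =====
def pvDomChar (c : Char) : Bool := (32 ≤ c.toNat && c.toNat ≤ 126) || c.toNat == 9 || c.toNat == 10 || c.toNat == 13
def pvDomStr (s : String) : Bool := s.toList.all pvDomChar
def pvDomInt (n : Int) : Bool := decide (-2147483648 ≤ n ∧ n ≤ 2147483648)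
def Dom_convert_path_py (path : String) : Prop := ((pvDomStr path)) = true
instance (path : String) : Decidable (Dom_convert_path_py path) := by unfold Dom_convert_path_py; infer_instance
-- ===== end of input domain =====

-- B replaces A's character-by-character index loop by a segment loop that jumps
-- to the next special character ('$'/'?') and bulk-converts plain runs (objective: alternative).

-- ===== PORT A =====
-- A's while-loop over the index i, ported over the remaining suffix `rest = path[i:]`
-- (A only reads path at or after i, and `path.find('}', i)` becomes the first '}' of `rest`).
def pvLoopA (rest acc : List Char) : List Char :=
  match rest with
  | [] => acc
  | c :: cs =>
    -- `i < len(path)-1 and path[i:i+2] == '${'` and `path.find('}', i) != -1`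
    if (c :: cs).take 2 = ['$', '{'] ∧ '}' ∈ (c :: cs) then
      let e := (c :: cs).idxOf '}'
      pvLoopA ((c :: cs).drop (e + 1)) (acc ++ (c :: cs).take (e + 1))
    else if c = '?' then acc ++ (c :: cs)           -- append path[i:], break
    else if c = '_' then pvLoopA cs (acc ++ ['-'])
    else pvLoopA cs (acc ++ [c])
termination_by rest.length
decreasing_by
  · simp only [List.length_drop]
    have := List.idxOf_lt_length_of_mem (by exact ‹_ ∧ _›.2)
    omega
  · simp
  · simp

def convert_path_py (path : String) : String :=
  if PySem.Str.isIn "_" path = false then path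
  else String.ofList (pvLoopA path.toList [])

-- ===== PORT B =====
-- seg.replace('_', '-') on a plain segment (exact: single-char pattern and replacement)
def pvRepl (cs : List Char) : List Char := cs.map (fun c => if c = '_' then '-' else c)

-- `_next_special`: index of the first '$' or '?'; Python's -1 sentinel is rendered
-- as `rest.length` (List.findIdx's "not found"), tested against below.
def pvSpecial (c : Char) : Bool := c = '$' || c = '?'

def pvLoopB (rest acc : List Char) : List Char :=
  match _h : rest with
  | [] => acc
  | _ :: _ =>
    let p := rest.findIdx pvSpecial
    if _hp : p = rest.length then acc ++ pvRepl rest          -- p == -1 in Python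
    else
      let pre := rest.take p
      let r2 := rest.drop p
      if r2.head? = some '?' then acc ++ pvRepl pre ++ r2
      else if r2.take 2 = ['$', '{'] ∧ '}' ∈ r2 then
        let e := r2.idxOf '}'
        pvLoopB (r2.drop (e + 1)) (acc ++ pvRepl pre ++ r2.take (e + 1))
      else pvLoopB (r2.drop 1) (acc ++ pvRepl pre ++ ['$'])
termination_by rest.length
decreasing_by
  · have hple : rest.findIdx pvSpecial ≤ rest.length := List.findIdx_le_length
    have hr2 : (rest.drop (rest.findIdx pvSpecial)).length = rest.length - rest.findIdx pvSpecial := by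
      simp
    simp only [List.length_drop]
    subst _h; omega
  · have hple : rest.findIdx pvSpecial ≤ rest.length := List.findIdx_le_length
    simp only [List.length_drop]
    subst _h; omega

def convert_path_py_alt (path : String) : String :=
  if PySem.Str.isIn "_" path = false then path
  else String.ofList (pvLoopB path.toList [])

-- ===== PRECONDITION & SPEC =====
def Spec_convert_path_py (path : String) (out : String) : Prop := out = convert_path_py_alt path
instance (path : String) (out : String) : Decidable (Spec_convert_path_py path out) := by unfold Spec_convert_path_py; infer_instance

-- ===== CLAIM (what is proved, stated in full; the proofs are below) =====
def Claim_equal_convert_path_py : Prop := ∀ (path : String), Dom_convert_path_py path → Spec_convert_path_py path (convert_path_py path)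

-- ===== LEMMAS AND PROOFS =====

-- A consumes a run of non-special characters one by one, producing exactly pvRepl of the run.
theorem pvLoopA_plain (pre : List Char) : ∀ (r acc : List Char),
    (∀ c ∈ pre, pvSpecial c = false) → pvLoopA (pre ++ r) acc = pvLoopA r (acc ++ pvRepl pre) := by
  induction pre with
  | nil => intro r acc _; simp [pvRepl]
  | cons c cs ih =>
    intro r acc hns
    have hc : pvSpecial c = false := hns c (by simp)
    have hcd : c ≠ '$' := by intro h; simp [pvSpecial, h] at hc
    have hcq : c ≠ '?' := by intro h; simp [pvSpecial, h] at hc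
    have hcs : ∀ x ∈ cs, pvSpecial x = false := fun x hx => hns x (by simp [hx])
    rw [List.cons_append, pvLoopA]
    have htake : ¬ ((c :: (cs ++ r)).take 2 = ['$', '{'] ∧ '}' ∈ c :: (cs ++ r)) := by
      intro ⟨h1, _⟩
      simp at h1
      exact hcd h1.1
    rw [if_neg htake, if_neg hcq]
    by_cases h_ : c = '_'
    · rw [if_pos h_, ih r _ hcs]
      simp [pvRepl, h_]
    · rw [if_neg h_, ih r _ hcs]
      simp [pvRepl, h_]

theorem pvLoop_eq : ∀ (n : ℕ) (rest acc : List Char), rest.length ≤ n →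
    pvLoopA rest acc = pvLoopB rest acc := by
  intro n
  induction n with
  | zero =>
    intro rest acc h
    have : rest = [] := List.eq_nil_of_length_eq_zero (by omega)
    subst this; rw [pvLoopA, pvLoopB]
  | succ n ih =>
    intro rest acc hlen
    cases hrest : rest with
    | nil => rw [pvLoopA, pvLoopB]
    | cons c cs =>
    subst hrest
    set p := (c :: cs).findIdx pvSpecial with hp
    have hple : p ≤ (c :: cs).length := List.findIdx_le_length
    have hpre : ∀ x ∈ (c :: cs).take p, pvSpecial x = false := by
      intro x hx
      obtain ⟨i, hi, hxi⟩ := List.getElem_of_mem hx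
      have hilt : i < p := by
        have := hi; simp [List.length_take] at this; omega
      have hg : ((c :: cs).take p)[i] = (c :: cs)[i]'(by omega) := List.getElem_take
      rw [← hxi, hg]
      exact List.not_of_lt_findIdx hilt
    have hsplit : (c :: cs) = (c :: cs).take p ++ (c :: cs).drop p := by simp
    rw [pvLoopB]
    rw [← hp]
    by_cases hpl : p = (c :: cs).length
    · -- no special character: A folds the whole list, B bulk-replaces it
      rw [dif_pos hpl]
      have hall : ∀ x ∈ (c :: cs), pvSpecial x = false := by
        intro x hx; apply hpre; rw [hpl, List.take_length]; exact hx
      have h0 := pvLoopA_plain (c :: cs) [] acc hall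
      rw [List.append_nil] at h0
      rw [h0, pvLoopA]
    · have hplt : p < (c :: cs).length := lt_of_le_of_ne hple hpl
      rw [dif_neg hpl]
      have hspec : pvSpecial ((c :: cs)[p]'hplt) = true := List.findIdx_getElem
      set r2 := (c :: cs).drop p with hr2
      set d := (c :: cs)[p]'hplt with hd
      have hr2cons : r2 = d :: (c :: cs).drop (p + 1) := by
        rw [hr2, List.drop_eq_getElem_cons hplt]
      have hA1 : pvLoopA (c :: cs) acc = pvLoopA r2 (acc ++ pvRepl ((c :: cs).take p)) := by
        conv_lhs => rw [hsplit]
        exact pvLoopA_plain _ _ _ hpre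
      rw [hA1]
      by_cases hdq : d = '?'
      · -- query tail
        rw [if_pos (show r2.head? = some '?' by rw [hr2cons, hdq]; rfl)]
        rw [hr2cons, pvLoopA]
        have hnt : ¬ ((d :: (c :: cs).drop (p + 1)).take 2 = ['$', '{'] ∧
            '}' ∈ d :: (c :: cs).drop (p + 1)) := by
          intro ⟨h1, _⟩
          simp at h1
          exact absurd h1.1 (by rw [hdq]; decide)
        rw [if_neg hnt, if_pos hdq]
      · have hdd : d = '$' := by
          simp [pvSpecial] at hspec
          rcases hspec with h | h
          · exact h
          · exact absurd h hdq
        have hqneg : ¬ r2.head? = some '?' := by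
          rw [hr2cons]; simp [hdd]
        rw [if_neg hqneg]
        have hr2len : r2.length = (c :: cs).length - p := by rw [hr2]; simp
        by_cases htpl : r2.take 2 = ['$', '{'] ∧ '}' ∈ r2
        · -- complete template literal: both skip to past '}'
          rw [if_pos htpl]
          have hAr : pvLoopA r2 (acc ++ pvRepl ((c :: cs).take p)) =
              pvLoopA (r2.drop (r2.idxOf '}' + 1))
                (acc ++ pvRepl ((c :: cs).take p) ++ r2.take (r2.idxOf '}' + 1)) := by
            rw [hr2cons, pvLoopA]
            rw [← hr2cons, if_pos (by rw [hr2cons] at htpl ⊢; exact htpl)]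
          rw [hAr]
          apply ih
          simp only [List.length_drop]
          omega
        · -- lone '$': both emit '$' and continue after it
          rw [if_neg htpl]
          have hAr : pvLoopA r2 (acc ++ pvRepl ((c :: cs).take p)) =
              pvLoopA (r2.drop 1) (acc ++ pvRepl ((c :: cs).take p) ++ ['$']) := by
            rw [hr2cons, pvLoopA]
            rw [← hr2cons, if_neg (by rw [hr2cons] at htpl ⊢; exact htpl)]
            rw [if_neg (by rw [hdd]; decide), if_neg (by rw [hdd]; decide)]
            rw [hr2cons, hdd]
            simp
          rw [hAr]
          apply ih
          simp only [List.length_drop]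
          omega

-- ===== VERDICT (by name: the statement is the Claim_ definition above) =====
theorem convert_path_py_spec : Claim_equal_convert_path_py := by
  intro path _
  unfold Spec_convert_path_py convert_path_py convert_path_py_alt
  by_cases h : PySem.Str.isIn "_" path = false
  · rw [if_pos h, if_pos h]
  · rw [if_neg h, if_neg h, pvLoop_eq path.toList.length _ _ le_rfl]
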